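-- pv_equiv track=rewrite | github.com/Kazun1998/library_for_python | Convolution/AND_Convolution.py | Convolution_AND
-- ===== SOURCE A (Python) =====
-- def Superset_Zeta_Transform(A):
--     """ A の上位集合を走る Zeta 変換を求める.
--
--     A の長さはある整数 N を用いて, 2^N でなくてはならない.
--     """
--     N=(len(A)-1).bit_length()
--     assert 1<<N==len(A), "列の要素数は 2^N でなくてはなりません."
--
--     for i in range(N):
--         bit=1<<i
--         for S in range(1<<N):
--             if not(S & bit):
--                 A[S]+=A[S|bit]
--                 A[S]%=Mod
--
-- def Superset_Mobius_Transform(A):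
--     """ A の上位集合を走る Mobius 変換を求める.
--
--     A の長さはある整数 N を用いて, 2^N でなくてはならない.
--     """
--
--     N=(len(A)-1).bit_length()
--     assert 1<<N==len(A), "列の要素数は 2^N でなくてはなりません."
--
--     for i in range(N):
--         bit=1<<i
--         for S in range(1<<N):
--             if not (S & bit):
--                 A[S]-=A[S|bit]
--                 A[S]%=Mod
--
-- def Convolution_AND(A,B):
--     """ AND 演算に関する畳込みを行う.
--
--     A,B: List
--     """
--
--     N=len(A); M=len(B)
--     L=1<<(max(N,M)-1).bit_length()
--
--     if min(N,M)<64: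
--         C=[0]*L
--         for i in range(N):
--             for j in range(M):
--                 C[i&j]+=A[i]*B[j]
--                 C[i&j]%=Mod
--         return C
--
--     A=A+[0]*(L-N)
--     B=B+[0]*(L-M)
--
--     Superset_Zeta_Transform(A)
--     Superset_Zeta_Transform(B)
--
--     for i in range(N):
--         A[i]*=B[i]
--         A[i]%=Mod
--
--     Superset_Mobius_Transform(A)
--     return A
--
-- Mod=998244353
-- ===== SOURCE B (Python) =====
-- Mod = 998244353
--
-- def _trans(A, sign):
--     """Recursive divide-and-conquer superset SOS transform (zeta for sign=+1, Moebius for sign=-1)."""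
--     if len(A) <= 1:
--         return A
--     h = len(A) // 2
--     lo = _trans(A[:h], sign)
--     hi = _trans(A[h:], sign)
--     return [(x + sign * y) % Mod for x, y in zip(lo, hi)] + hi
--
-- def Convolution_AND(A, B):
--     N = len(A); M = len(B)
--     L = 1 << (max(N, M) - 1).bit_length()
--     if min(N, M) < 64:
--         C = [0] * L
--         for i in range(N):
--             ai = A[i]
--             for j in range(M):
--                 C[i & j] += ai * B[j]
--         return [c % Mod for c in C]
--     Az = _trans(A + [0] * (L - N), 1)
--     Bz = _trans(B + [0] * (L - M), 1)
--     return _trans([x * y % Mod for x, y in zip(Az, Bz)], -1)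
-- ===== Notes on version B (the rewrite author's own statement) =====
-- stated objective: alternative
-- what changed: The two in-place iterative bit-by-bit SOS (zeta/Moebius) transforms are replaced by one recursive divide-and-conquer transform on halves, the pointwise product is taken over the two whole transformed arrays in one zip (equivalent because the zeta transform of the zero-padded array is identically zero beyond len(A)), and the naive branch accumulates exact integer sums with a single mod pass at the end instead of reducing mod after every update.
import Mathlib
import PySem

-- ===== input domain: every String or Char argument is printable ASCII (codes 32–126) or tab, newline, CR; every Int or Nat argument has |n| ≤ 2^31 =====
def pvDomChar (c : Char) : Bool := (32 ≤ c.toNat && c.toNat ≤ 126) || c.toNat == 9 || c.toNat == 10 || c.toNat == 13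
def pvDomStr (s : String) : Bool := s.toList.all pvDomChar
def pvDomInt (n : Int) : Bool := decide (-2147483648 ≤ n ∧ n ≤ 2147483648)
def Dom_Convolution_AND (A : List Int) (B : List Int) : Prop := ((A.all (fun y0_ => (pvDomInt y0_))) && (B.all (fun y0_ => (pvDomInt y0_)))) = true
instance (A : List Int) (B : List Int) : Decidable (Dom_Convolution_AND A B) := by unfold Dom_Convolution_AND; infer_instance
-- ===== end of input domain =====

-- B replaces the two iterative in-place SOS transforms with one recursive divide-and-conquer
-- transform, takes the pointwise product of the two whole transformed arrays in one zip
-- (equivalent: the transformed tail beyond len(A) is identically zero), and in the naive branch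
-- accumulates exact sums with a single final mod pass.  Neither program mutates its arguments
-- (Python A rebinds A/B before mutating); the claim is about return values.

def pyMod : Int := 998244353

-- ===== PORT A =====
-- One pass of the in-place loop `for S in range(L): if not (S & bit): A[S] = g(A[S], A[S|bit]) % ...`
-- (g already carries the `% Mod`); `getD` is exact: every index used is in range at the call sites.
def pvPass (g : Int → Int → Int) (bit L : Nat) (A : List Int) : List Int :=
  (List.range L).foldl
    (fun acc S => if S &&& bit == 0 then acc.set S (g (acc.getD S 0) (acc.getD (S ||| bit) 0)) else acc) A

-- `Superset_Zeta_Transform` / `Superset_Mobius_Transform`, parameterized by the combining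
-- statement g (zeta: (a+b)%Mod, Moebius: (a-b)%Mod).  The Python assert `1<<N == len(A)`
-- holds at every call site (the argument has length L = 1 << bit_length), so it is not modelled.
def pvTransform (g : Int → Int → Int) (A : List Int) : List Int :=
  let N := PySem.Int.bitLength ((A.length : Int) - 1)
  (List.range N).foldl (fun acc i => pvPass g (1 <<< i) (1 <<< N) acc) A

def Convolution_AND (A : List Int) (B : List Int) : List Int :=
  let N := A.length
  let M := B.length
  let L : Nat := 1 <<< PySem.Int.bitLength ((Nat.max N M : Int) - 1)
  if Nat.min N M < 64 then
    (List.range N).foldl (fun C i =>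
      (List.range M).foldl (fun C j =>
        C.set (i &&& j) ((C.getD (i &&& j) 0 + A.getD i 0 * B.getD j 0) % pyMod)) C)
      (List.replicate L 0)
  else
    let A' := A ++ List.replicate (L - N) 0
    let B' := B ++ List.replicate (L - M) 0
    let A'' := pvTransform (fun a b => (a + b) % pyMod) A'
    let B'' := pvTransform (fun a b => (a + b) % pyMod) B'
    let A3 := (List.range N).foldl (fun acc i => acc.set i ((acc.getD i 0 * B''.getD i 0) % pyMod)) A''
    pvTransform (fun a b => (a - b) % pyMod) A3

-- ===== PORT B =====
-- `_trans(A, sign)`: recursive divide-and-conquer SOS transform.  The fuel argument (called with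
-- fuel = length) only makes the recursion structural; it never runs out on the lengths reached.
def pvRecTrans (sign : Int) : Nat → List Int → List Int
  | 0, A => A
  | fuel + 1, A =>
    if A.length ≤ 1 then A
    else
      let h := A.length / 2
      let lo := pvRecTrans sign fuel (A.take h)
      let hi := pvRecTrans sign fuel (A.drop h)
      (List.zipWith (fun x y => (x + sign * y) % pyMod) lo hi) ++ hi

def Convolution_AND_alt (A : List Int) (B : List Int) : List Int :=
  let N := A.length
  let M := B.length
  let L : Nat := 1 <<< PySem.Int.bitLength ((Nat.max N M : Int) - 1)
  if Nat.min N M < 64 then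
    ((List.range N).foldl (fun C i =>
        let ai := A.getD i 0
        (List.range M).foldl (fun C j =>
          C.set (i &&& j) (C.getD (i &&& j) 0 + ai * B.getD j 0)) C)
      (List.replicate L 0)).map (fun c => c % pyMod)
  else
    let Az := pvRecTrans 1 L (A ++ List.replicate (L - N) 0)
    let Bz := pvRecTrans 1 L (B ++ List.replicate (L - M) 0)
    pvRecTrans (-1) L (List.zipWith (fun x y => (x * y) % pyMod) Az Bz)

-- ===== PRECONDITION & SPEC =====
def Spec_Convolution_AND (A : List Int) (B : List Int) (out : List Int) : Prop := out = Convolution_AND_alt A B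
instance (A : List Int) (B : List Int) (out : List Int) : Decidable (Spec_Convolution_AND A B out) := by unfold Spec_Convolution_AND; infer_instance

-- ===== CLAIM (what is proved, stated in full; the proofs are below) =====
def Claim_equal_Convolution_AND : Prop := ∀ (A : List Int) (B : List Int), Dom_Convolution_AND A B → Spec_Convolution_AND A B (Convolution_AND A B)

-- ===== LEMMAS AND PROOFS =====

-- a list is the range-map of its own getD
lemma pv_self_eq_map_range (l : List Int) : l = (List.range l.length).map (fun i => l.getD i 0) := by
  apply List.ext_getElem
  · simp
  · intro i h1 h2
    simp [List.getD_eq_getElem?_getD, List.getElem?_eq_getElem h1]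

lemma pv_getD_map_range (f : Nat → Int) (n i : Nat) :
    ((List.range n).map f).getD i 0 = if i < n then f i else 0 := by
  by_cases h : i < n
  · simp only [if_pos h]
    exact PySem.List.getD_map_range f n i 0 h
  · rw [if_neg h]
    apply List.getD_eq_default
    simpa using Nat.le_of_not_lt h

lemma pv_set_map_range (f : Nat → Int) (n t : Nat) (v : Int) (ht : t < n) :
    ((List.range n).map f).set t v = (List.range n).map (fun S => if S = t then v else f S) := by
  apply List.ext_getElem
  · simp
  · intro i h1 h2
    simp only [List.getElem_set, List.getElem_map, List.getElem_range]
    by_cases hi : i = t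
    · subst hi; simp
    · rw [if_neg (fun hh => hi hh.symm), if_neg hi]

-- testBit of 2^m + s for s < 2^m
lemma pv_testBit_two_pow_add (m s i : Nat) (h : s < 2 ^ m) :
    (2 ^ m + s).testBit i = (decide (i = m) || s.testBit i) := by
  rcases lt_trichotomy i m with hi | hi | hi
  · rw [Nat.testBit_eq_decide_div_mod_eq, Nat.testBit_eq_decide_div_mod_eq]
    have hd : (2 ^ m + s) / 2 ^ i = 2 ^ (m - i) + s / 2 ^ i := by
      rw [Nat.add_div_of_dvd_right (pow_dvd_pow 2 (le_of_lt hi)),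
        Nat.pow_div (le_of_lt hi) (by norm_num)]
    rw [hd]
    have h2 : 2 ^ (m - i) % 2 = 0 := by
      have : m - i ≠ 0 := by omega
      rcases Nat.exists_eq_succ_of_ne_zero this with ⟨w, hw⟩
      rw [hw, pow_succ, Nat.mul_mod_left]
    have hne : ¬ (i = m) := by omega
    simp [Nat.add_mod, h2, hne]
  · subst hi
    rw [Nat.testBit_eq_decide_div_mod_eq]
    have : (2 ^ i + s) / 2 ^ i = 1 := by
      rw [Nat.add_div_of_dvd_right dvd_rfl, Nat.div_self (by positivity), Nat.div_eq_of_lt h]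
    simp [this]
  · have h1 : (2 ^ m + s).testBit i = false := by
      apply Nat.testBit_lt_two_pow
      have : 2 ^ m + s < 2 ^ (m + 1) := by rw [pow_succ]; omega
      calc 2 ^ m + s < 2 ^ (m+1) := this
        _ ≤ 2 ^ i := Nat.pow_le_pow_right (by norm_num) (by omega)
    have h2 : s.testBit i = false := by
      apply Nat.testBit_lt_two_pow
      exact lt_of_lt_of_le h (Nat.pow_le_pow_right (by norm_num) (by omega))
    simp [h1, h2]; omega

lemma pv_two_pow_add_eq_or (m s : Nat) (h : s < 2 ^ m) : 2 ^ m + s = 2 ^ m ||| s := by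
  apply Nat.eq_of_testBit_eq
  intro i
  rw [pv_testBit_two_pow_add m s i h, Nat.testBit_lor, Nat.testBit_two_pow]
  by_cases hi : i = m <;> simp [hi]
  intro hc; exact absurd hc.symm hi

lemma pv_and_two_pow_of_lt (s m : Nat) (h : s < 2 ^ m) : s &&& 2 ^ m = 0 := by
  rw [Nat.and_two_pow, Nat.testBit_lt_two_pow h]; simp

lemma pv_add_and_low (m i s : Nat) (him : i < m) (hs : s < 2 ^ m) :
    (2 ^ m + s) &&& 2 ^ i = s &&& 2 ^ i := by
  rw [pv_two_pow_add_eq_or m s hs, Nat.and_or_distrib_right, Nat.and_two_pow,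
    Nat.testBit_two_pow]
  have : ¬ (m = i) := by omega
  simp [this]

lemma pv_add_or_low (m i s : Nat) (him : i < m) (hs : s < 2 ^ m) :
    (2 ^ m + s) ||| 2 ^ i = 2 ^ m + (s ||| 2 ^ i) := by
  have h5 : s ||| 2 ^ i < 2 ^ m :=
    Nat.or_lt_two_pow hs (Nat.pow_lt_pow_right (by norm_num) him)
  rw [pv_two_pow_add_eq_or m s hs, Nat.or_assoc, pv_two_pow_add_eq_or m _ h5]

lemma pv_add_and_top (m s : Nat) (hs : s < 2 ^ m) : (2 ^ m + s) &&& 2 ^ m = 2 ^ m := by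
  rw [pv_two_pow_add_eq_or m s hs, Nat.and_or_distrib_right, Nat.and_self,
    pv_and_two_pow_of_lt s m hs]
  simp

lemma pv_or_and_self_ne (t bit : Nat) (hbit : bit ≠ 0) : (t ||| bit) &&& bit ≠ 0 := by
  rw [Nat.and_or_distrib_right, Nat.and_self]
  intro hc
  have hle : bit ≤ t &&& bit ||| bit := Nat.right_le_or
  omega

-- the inner pass loop, characterized pointwise
lemma pv_pass_foldl (g : Int → Int → Int) (bit : Nat) (hbit : bit ≠ 0) (A : List Int) :
    ∀ t, t ≤ A.length →
    (List.range t).foldl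
      (fun acc S => if S &&& bit == 0 then acc.set S (g (acc.getD S 0) (acc.getD (S ||| bit) 0)) else acc) A
    = (List.range A.length).map
        (fun S => if S < t ∧ S &&& bit = 0 then g (A.getD S 0) (A.getD (S ||| bit) 0) else A.getD S 0) := by
  intro t
  induction t with
  | zero =>
    intro _
    simp only [List.range_zero, List.foldl_nil]
    have := pv_self_eq_map_range A
    conv_lhs => rw [this]
    apply List.map_congr_left
    intro S hS
    simp
  | succ t ih =>
    intro ht
    rw [List.range_succ, List.foldl_append, ih (by omega)]
    simp only [List.foldl_cons, List.foldl_nil]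
    have htlen : t < A.length := by omega
    by_cases hb : t &&& bit = 0
    · have hb' : (t &&& bit == 0) = true := by simpa using hb
      rw [if_pos hb']
      have hv1 : ((List.range A.length).map
          (fun S => if S < t ∧ S &&& bit = 0 then g (A.getD S 0) (A.getD (S ||| bit) 0) else A.getD S 0)).getD t 0
          = A.getD t 0 := by
        rw [pv_getD_map_range]
        simp [htlen]
      have hv2 : ((List.range A.length).map
          (fun S => if S < t ∧ S &&& bit = 0 then g (A.getD S 0) (A.getD (S ||| bit) 0) else A.getD S 0)).getD (t ||| bit) 0
          = A.getD (t ||| bit) 0 := by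
        rw [pv_getD_map_range]
        by_cases hlt : t ||| bit < A.length
        · simp [hlt, pv_or_and_self_ne t bit hbit]
        · rw [if_neg hlt]
          rw [List.getD_eq_default]
          omega
      rw [hv1, hv2, pv_set_map_range _ _ _ _ htlen]
      apply List.map_congr_left
      intro S hS
      simp only [List.mem_range] at hS
      by_cases hSt : S = t
      · subst hSt
        simp [hb]
      · have h1 : (S < t + 1 ∧ S &&& bit = 0) ↔ (S < t ∧ S &&& bit = 0) := by
          constructor <;> rintro ⟨h', h''⟩ <;> exact ⟨by omega, h''⟩
        simp only [if_neg hSt, h1]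
    · have hb' : (t &&& bit == 0) = false := by simpa using hb
      rw [hb']
      simp only [Bool.false_eq_true, if_false]
      apply List.map_congr_left
      intro S hS
      simp only [List.mem_range] at hS
      by_cases hSt : S = t
      · subst hSt
        simp [hb]
      · have h1 : (S < t + 1 ∧ S &&& bit = 0) ↔ (S < t ∧ S &&& bit = 0) := by
          constructor <;> rintro ⟨h', h''⟩ <;> exact ⟨by omega, h''⟩
        simp only [h1]

lemma pv_pass_eq (g : Int → Int → Int) (bit L : Nat) (hbit : bit ≠ 0) (A : List Int)
    (hL : A.length = L) :
    pvPass g bit L A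
    = (List.range L).map
        (fun S => if S &&& bit = 0 then g (A.getD S 0) (A.getD (S ||| bit) 0) else A.getD S 0) := by
  unfold pvPass
  rw [← hL, pv_pass_foldl g bit hbit A A.length le_rfl]
  apply List.map_congr_left
  intro S hS
  simp only [List.mem_range] at hS
  simp [hS]

lemma pv_pass_length (g : Int → Int → Int) (bit L : Nat) (hbit : bit ≠ 0) (A : List Int)
    (hL : A.length = L) : (pvPass g bit L A).length = L := by
  rw [pv_pass_eq g bit L hbit A hL]; simp

-- a low-bit pass splits over the two halves
lemma pv_getD_append_left (lo hi : List Int) (S : Nat) (h : S < lo.length) :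
    (lo ++ hi).getD S 0 = lo.getD S 0 := by
  rw [List.getD_eq_getElem?_getD, List.getD_eq_getElem?_getD, List.getElem?_append_left h]
lemma pv_getD_append_right (lo hi : List Int) (S : Nat) (h : lo.length ≤ S) :
    (lo ++ hi).getD S 0 = hi.getD (S - lo.length) 0 := by
  rw [List.getD_eq_getElem?_getD, List.getD_eq_getElem?_getD, List.getElem?_append_right h]
lemma pv_pass_split (g : Int → Int → Int) (i m : Nat) (him : i < m) (lo hi : List Int)
    (hlo : lo.length = 2 ^ m) (hhi : hi.length = 2 ^ m) :
    pvPass g (2 ^ i) (2 ^ (m + 1)) (lo ++ hi)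
    = pvPass g (2 ^ i) (2 ^ m) lo ++ pvPass g (2 ^ i) (2 ^ m) hi := by
  have hbit : (2:Nat) ^ i ≠ 0 := by positivity
  have hlen : (lo ++ hi).length = 2 ^ (m + 1) := by simp [hlo, hhi]; ring
  rw [pv_pass_eq g _ _ hbit _ hlen, pv_pass_eq g _ _ hbit _ hlo, pv_pass_eq g _ _ hbit _ hhi,
    show (2:Nat) ^ (m+1) = 2 ^ m + 2 ^ m by ring, List.range_add, List.map_append, List.map_map]
  congr 1
  · apply List.map_congr_left
    intro S hS
    simp only [List.mem_range] at hS
    have h1 : S ||| 2 ^ i < 2 ^ m :=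
      Nat.or_lt_two_pow hS (Nat.pow_lt_pow_right (by norm_num) him)
    rw [pv_getD_append_left lo hi S (by omega), pv_getD_append_left lo hi _ (by omega)]
  · apply List.map_congr_left
    intro s hs
    simp only [List.mem_range] at hs
    simp only [Function.comp]
    rw [pv_add_and_low m i s him hs, pv_add_or_low m i s him hs,
      pv_getD_append_right lo hi _ (by omega), pv_getD_append_right lo hi _ (by omega)]
    have h5 : s ||| 2 ^ i < 2 ^ m :=
      Nat.or_lt_two_pow hs (Nat.pow_lt_pow_right (by norm_num) him)
    have e1 : 2 ^ m + s - lo.length = s := by omega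
    have e2 : 2 ^ m + (s ||| 2 ^ i) - lo.length = s ||| 2 ^ i := by omega
    rw [e1, e2]

-- the top-bit pass combines the halves
lemma pv_zipWith_eq_map_range (g : Int → Int → Int) (lo hi : List Int) (h : lo.length = hi.length) :
    List.zipWith g lo hi = (List.range lo.length).map (fun S => g (lo.getD S 0) (hi.getD S 0)) := by
  apply List.ext_getElem
  · simp [h]
  · intro n h1 h2
    simp only [List.getElem_zipWith, List.getElem_map, List.getElem_range]
    simp only [List.length_zipWith, ← h, Nat.min_self] at h1
    rw [List.getD_eq_getElem _ _ (by omega), List.getD_eq_getElem _ _ (by omega)]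
lemma pv_pass_top (g : Int → Int → Int) (m : Nat) (lo hi : List Int)
    (hlo : lo.length = 2 ^ m) (hhi : hi.length = 2 ^ m) :
    pvPass g (2 ^ m) (2 ^ (m + 1)) (lo ++ hi) = List.zipWith g lo hi ++ hi := by
  have hbit : (2:Nat) ^ m ≠ 0 := by positivity
  have hlen : (lo ++ hi).length = 2 ^ (m + 1) := by simp [hlo, hhi]; ring
  rw [pv_pass_eq g _ _ hbit _ hlen,
    show (2:Nat) ^ (m+1) = 2 ^ m + 2 ^ m by ring, List.range_add, List.map_append, List.map_map]
  congr 1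
  · rw [pv_zipWith_eq_map_range g lo hi (by omega), hlo]
    apply List.map_congr_left
    intro S hS
    simp only [List.mem_range] at hS
    rw [if_pos (pv_and_two_pow_of_lt S m hS)]
    have hor : S ||| 2 ^ m = 2 ^ m + S := by
      rw [Nat.or_comm, ← pv_two_pow_add_eq_or m S hS]
    rw [hor, pv_getD_append_left lo hi S (by omega), pv_getD_append_right lo hi _ (by omega)]
    have e1 : 2 ^ m + S - lo.length = S := by omega
    rw [e1]
  · have : hi = (List.range (2 ^ m)).map (fun s => hi.getD s 0) := by
      have := pv_self_eq_map_range hi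
      rwa [hhi] at this
    conv_rhs => rw [this]
    apply List.map_congr_left
    intro s hs
    simp only [List.mem_range] at hs
    simp only [Function.comp]
    have hne : (2 ^ m + s) &&& 2 ^ m ≠ 0 := by
      rw [pv_add_and_top m s hs]; positivity
    rw [if_neg hne, pv_getD_append_right lo hi _ (by omega)]
    have e1 : 2 ^ m + s - lo.length = s := by omega
    rw [e1]

lemma pv_passes_length (g : Int → Int → Int) (m : Nat) (X : List Int) (hX : X.length = 2 ^ m) :
    ∀ j, ((List.range j).foldl (fun acc i => pvPass g (1 <<< i) (2 ^ m) acc) X).length = 2 ^ m := by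
  intro j
  induction j with
  | zero => simpa
  | succ j ih =>
    rw [List.range_succ, List.foldl_append]
    simp only [List.foldl_cons, List.foldl_nil]
    exact pv_pass_length _ _ _ (by rw [Nat.one_shiftLeft]; positivity) _ ih

lemma pv_passes_split (g : Int → Int → Int) (m : Nat) (lo hi : List Int)
    (hlo : lo.length = 2 ^ m) (hhi : hi.length = 2 ^ m) :
    ∀ j, j ≤ m →
    (List.range j).foldl (fun acc i => pvPass g (1 <<< i) (2 ^ (m + 1)) acc) (lo ++ hi)
    = (List.range j).foldl (fun acc i => pvPass g (1 <<< i) (2 ^ m) acc) lo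
      ++ (List.range j).foldl (fun acc i => pvPass g (1 <<< i) (2 ^ m) acc) hi := by
  intro j
  induction j with
  | zero => simp
  | succ j ih =>
    intro hj
    rw [List.range_succ, List.foldl_append, List.foldl_append, List.foldl_append, ih (by omega)]
    simp only [List.foldl_cons, List.foldl_nil]
    rw [show (1:Nat) <<< j = 2 ^ j from Nat.one_shiftLeft j]
    exact pv_pass_split g j m (by omega) _ _
      (pv_passes_length g m lo hlo j) (pv_passes_length g m hi hhi j)

lemma pv_bitLength_pow_sub_one (n : Nat) :
    PySem.Int.bitLength (((2 ^ n : Nat) : Int) - 1) = n := by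
  have hcast : ((2 ^ n : Nat) : Int) - 1 = ((2 ^ n - 1 : Nat) : Int) := by
    have : (1:Nat) ≤ 2 ^ n := Nat.one_le_two_pow
    push_cast [this]
    ring
  rw [hcast]
  rcases Nat.eq_zero_or_pos n with hn | hn
  · subst hn; simp [PySem.Int.bitLength_zero]
  · have hne : (2 ^ n - 1 : Nat) ≠ 0 := by
      have : (2:Nat) ^ 1 ≤ 2 ^ n := Nat.pow_le_pow_right (by norm_num) hn
      omega
    have h1 := PySem.Int.lt_two_pow_bitLength ((2 ^ n - 1 : Nat) : Int)
    have h2 := PySem.Int.two_pow_bitLength_le ((2 ^ n - 1 : Nat) : Int) (by exact_mod_cast hne)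
    rw [Int.natAbs_natCast] at h1 h2
    set b := PySem.Int.bitLength ((2 ^ n - 1 : Nat) : Int) with hb
    have hb1 : 2 ^ n ≤ 2 ^ b := by omega
    have hb2 : 2 ^ (b - 1) < 2 ^ n := by omega
    have l1 : n ≤ b := (Nat.pow_le_pow_iff_right (by norm_num)).mp hb1
    have l2 : b - 1 < n := (Nat.pow_lt_pow_iff_right (by norm_num)).mp hb2
    omega

-- iterative transform = recursive transform, on power-of-two lengths
lemma pv_trans_eq (g : Int → Int → Int) (sign : Int)
    (hg : ∀ x y : Int, g x y = (x + sign * y) % pyMod) :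
    ∀ k (A : List Int) (fuel : Nat), A.length = 2 ^ k → k ≤ fuel →
      pvTransform g A = pvRecTrans sign fuel A := by
  intro k
  induction k with
  | zero =>
    intro A fuel hA hf
    have h1 : A.length = 1 := by simpa using hA
    unfold pvTransform
    rw [h1]
    norm_num [PySem.Int.bitLength_zero]
    cases fuel with
    | zero => rfl
    | succ f => rw [pvRecTrans]; simp [h1]
  | succ k ih =>
    intro A fuel hA hf
    cases fuel with
    | zero => omega
    | succ f =>
      have hk : k ≤ f := by omega
      have hbl : PySem.Int.bitLength ((A.length : Int) - 1) = k + 1 := by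
        rw [hA]; exact pv_bitLength_pow_sub_one (k + 1)
      have hlo : (A.take (2 ^ k)).length = 2 ^ k := by
        simp [hA]; rw [pow_succ]; omega
      have hhi : (A.drop (2 ^ k)).length = 2 ^ k := by
        simp [hA]; rw [pow_succ]; omega
      have hsplit : A = A.take (2 ^ k) ++ A.drop (2 ^ k) := (List.take_append_drop _ _).symm
      -- unfold the iterative transform
      show (List.range (PySem.Int.bitLength ((A.length : Int) - 1))).foldl
          (fun acc i => pvPass g (1 <<< i) (1 <<< (PySem.Int.bitLength ((A.length : Int) - 1))) acc) A
        = pvRecTrans sign (f + 1) A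
      rw [hbl, List.range_succ, List.foldl_append]
      simp only [List.foldl_cons, List.foldl_nil]
      rw [show (1:Nat) <<< (k+1) = 2 ^ (k+1) from Nat.one_shiftLeft _,
        show (1:Nat) <<< k = 2 ^ k from Nat.one_shiftLeft _]
      conv_lhs => rw [hsplit]
      rw [pv_passes_split g k _ _ hlo hhi k le_rfl]
      have hP : ∀ X : List Int, X.length = 2 ^ k →
          (List.range k).foldl (fun acc i => pvPass g (1 <<< i) (2 ^ k) acc) X
          = pvRecTrans sign f X := by
        intro X hX
        have h2 : pvTransform g X
            = (List.range k).foldl (fun acc i => pvPass g (1 <<< i) (2 ^ k) acc) X := by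
          show (List.range (PySem.Int.bitLength ((X.length : Int) - 1))).foldl
              (fun acc i => pvPass g (1 <<< i) (1 <<< (PySem.Int.bitLength ((X.length : Int) - 1))) acc) X
            = _
          rw [hX, pv_bitLength_pow_sub_one k, Nat.one_shiftLeft]
        rw [← h2]
        exact ih X f hX hk
      rw [hP _ hlo, hP _ hhi]
      have hlolen : (pvRecTrans sign f (A.take (2 ^ k))).length = 2 ^ k := by
        rw [← hP _ hlo]; exact pv_passes_length g k _ hlo k
      have hhilen : (pvRecTrans sign f (A.drop (2 ^ k))).length = 2 ^ k := by
        rw [← hP _ hhi]; exact pv_passes_length g k _ hhi k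
      rw [pv_pass_top g k _ _ hlolen hhilen]
      -- unfold the recursive transform
      rw [pvRecTrans]
      have hlen1 : ¬ A.length ≤ 1 := by
        rw [hA, pow_succ]
        have : (1:Nat) ≤ 2 ^ k := Nat.one_le_two_pow
        omega
      rw [if_neg hlen1]
      have hhalf : A.length / 2 = 2 ^ k := by rw [hA, pow_succ]; omega
      simp only [hhalf]
      congr 1
      have hgeq : g = fun x y => (x + sign * y) % pyMod :=
        funext fun x => funext fun y => hg x y
      rw [hgeq]

-- a pass preserves "zero from index N on" (supersets of S ≥ N are ≥ N)
lemma pv_pass_zero (g : Int → Int → Int) (hg : g 0 0 = 0) (bit L N : Nat) (hbit : bit ≠ 0)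
    (X : List Int) (hX : X.length = L) (hz : ∀ S, N ≤ S → X.getD S 0 = 0) :
    ∀ S, N ≤ S → (pvPass g bit L X).getD S 0 = 0 := by
  intro S hS
  rw [pv_pass_eq g bit L hbit X hX, pv_getD_map_range]
  by_cases hL : S < L
  · rw [if_pos hL]
    have h1 : X.getD S 0 = 0 := hz S hS
    have h2 : X.getD (S ||| bit) 0 = 0 := hz _ (le_trans hS Nat.left_le_or)
    rw [h1, h2, hg]
    split <;> rfl
  · rw [if_neg hL]

lemma pv_passes_zero (g : Int → Int → Int) (hg : g 0 0 = 0) (m N : Nat) :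
    ∀ j (X : List Int), X.length = 2 ^ m → (∀ S, N ≤ S → X.getD S 0 = 0) →
    ∀ S, N ≤ S →
    ((List.range j).foldl (fun acc i => pvPass g (1 <<< i) (2 ^ m) acc) X).getD S 0 = 0 := by
  intro j
  induction j with
  | zero => intro X _ hz S hS; simpa using hz S hS
  | succ j ih =>
    intro X hX hz S hS
    rw [List.range_succ, List.foldl_append]
    simp only [List.foldl_cons, List.foldl_nil]
    exact pv_pass_zero g hg _ _ N (by rw [Nat.one_shiftLeft]; positivity) _
      (pv_passes_length g m X hX j) (fun S' hS' => ih X hX hz S' hS') S hS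

lemma pv_transform_zero (g : Int → Int → Int) (hg : g 0 0 = 0) (m N : Nat) (X : List Int)
    (hX : X.length = 2 ^ m) (hz : ∀ S, N ≤ S → X.getD S 0 = 0) :
    ∀ S, N ≤ S → (pvTransform g X).getD S 0 = 0 := by
  intro S hS
  have h2 : pvTransform g X
      = (List.range m).foldl (fun acc i => pvPass g (1 <<< i) (2 ^ m) acc) X := by
    show (List.range (PySem.Int.bitLength ((X.length : Int) - 1))).foldl
        (fun acc i => pvPass g (1 <<< i) (1 <<< (PySem.Int.bitLength ((X.length : Int) - 1))) acc) X
      = _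
    rw [hX, pv_bitLength_pow_sub_one m, Nat.one_shiftLeft]
  rw [h2]
  exact pv_passes_zero g hg m N m X hX hz S hS

-- the pointwise-multiplication loop, characterized pointwise
lemma pv_mul_foldl (f : Nat → Int → Int) (X : List Int) :
    ∀ t, t ≤ X.length →
    (List.range t).foldl (fun acc i => acc.set i (f i (acc.getD i 0))) X
    = (List.range X.length).map (fun i => if i < t then f i (X.getD i 0) else X.getD i 0) := by
  intro t
  induction t with
  | zero =>
    intro _
    simp only [List.range_zero, List.foldl_nil]
    conv_lhs => rw [pv_self_eq_map_range X]
    apply List.map_congr_left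
    intro S hS
    simp
  | succ t ih =>
    intro ht
    rw [List.range_succ, List.foldl_append, ih (by omega)]
    simp only [List.foldl_cons, List.foldl_nil]
    have htlen : t < X.length := by omega
    have hv : ((List.range X.length).map
        (fun i => if i < t then f i (X.getD i 0) else X.getD i 0)).getD t 0 = X.getD t 0 := by
      rw [pv_getD_map_range]; simp [htlen]
    rw [hv, pv_set_map_range _ _ _ _ htlen]
    apply List.map_congr_left
    intro S hS
    simp only [List.mem_range] at hS
    by_cases hSt : S = t
    · subst hSt; simp
    · have h1 : S < t + 1 ↔ S < t := by omega
      simp only [if_neg hSt, h1]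

lemma pv_max_le_shift (v : Nat) : v ≤ 1 <<< PySem.Int.bitLength ((v : Int) - 1) := by
  rcases Nat.eq_zero_or_pos v with hv | hv
  · subst hv; exact Nat.zero_le _
  · have hcast : ((v : Int) - 1) = ((v - 1 : Nat) : Int) := by push_cast [hv]; ring
    rw [hcast, Nat.one_shiftLeft]
    have h1 := PySem.Int.lt_two_pow_bitLength ((v - 1 : Nat) : Int)
    rw [Int.natAbs_natCast] at h1
    omega

-- naive branch: mod-every-step = mod-at-the-end
lemma pv_naive_step (C : List Int) (k : Nat) (v : Int) :
    (C.map (fun c => c % pyMod)).set k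
        (((C.map (fun c => c % pyMod)).getD k 0 + v) % pyMod)
    = (C.set k (C.getD k 0 + v)).map (fun c => c % pyMod) := by
  rw [List.map_set]
  congr 1
  have h1 : (C.map (fun c => c % pyMod)).getD k ((0:Int) % pyMod) = (C.getD k 0) % pyMod :=
    List.getD_map C 0 (fun c => c % pyMod)
  rw [Int.zero_emod] at h1
  rw [h1, Int.emod_add_emod]
lemma pv_naive_eq (A B : List Int) (L : Nat) :
    (List.range A.length).foldl (fun C i =>
      (List.range B.length).foldl (fun C j =>
        C.set (i &&& j) ((C.getD (i &&& j) 0 + A.getD i 0 * B.getD j 0) % pyMod)) C)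
      (List.replicate L 0)
    = ((List.range A.length).foldl (fun C i =>
        let ai := A.getD i 0
        (List.range B.length).foldl (fun C j =>
          C.set (i &&& j) (C.getD (i &&& j) 0 + ai * B.getD j 0)) C)
      (List.replicate L 0)).map (fun c => c % pyMod) := by
  have hinit : List.replicate L (0:Int) = (List.replicate L (0:Int)).map (fun c => c % pyMod) := by
    rw [List.map_replicate]; norm_num
  conv_lhs => rw [hinit]
  rw [List.foldl_hom (fun C : List Int => C.map (fun c => c % pyMod))]
  intro C i
  rw [List.foldl_hom (fun C : List Int => C.map (fun c => c % pyMod))]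
  intro C' j
  exact pv_naive_step C' (i &&& j) (A.getD i 0 * B.getD j 0)

lemma pv_trans_length (g : Int → Int → Int) (k : Nat) (A : List Int) (hA : A.length = 2 ^ k) :
    (pvTransform g A).length = 2 ^ k := by
  have h2 : pvTransform g A
      = (List.range k).foldl (fun acc i => pvPass g (1 <<< i) (2 ^ k) acc) A := by
    show (List.range (PySem.Int.bitLength ((A.length : Int) - 1))).foldl
        (fun acc i => pvPass g (1 <<< i) (1 <<< (PySem.Int.bitLength ((A.length : Int) - 1))) acc) A
      = _
    rw [hA, pv_bitLength_pow_sub_one k, Nat.one_shiftLeft]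
  rw [h2]
  exact pv_passes_length g k A hA k

-- ===== VERDICT (by name: the statement is the Claim_ definition above) =====
theorem Convolution_AND_spec : Claim_equal_Convolution_AND := by
  intro A B _
  unfold Spec_Convolution_AND
  show Convolution_AND A B = Convolution_AND_alt A B
  simp only [Convolution_AND, Convolution_AND_alt]
  set N := A.length with hN
  set M := B.length with hM
  set kk := PySem.Int.bitLength ((Nat.max N M : Int) - 1) with hkk
  set L : Nat := 1 <<< kk with hL
  have hL2 : L = 2 ^ kk := Nat.one_shiftLeft kk
  by_cases hmin : Nat.min N M < 64
  · rw [if_pos hmin, if_pos hmin]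
    exact pv_naive_eq A B L
  · rw [if_neg hmin, if_neg hmin]
    have hNL : N ≤ L := le_trans (Nat.le_max_left N M) (pv_max_le_shift (Nat.max N M))
    have hML : M ≤ L := le_trans (Nat.le_max_right N M) (pv_max_le_shift (Nat.max N M))
    have hAlen : (A ++ List.replicate (L - N) 0).length = 2 ^ kk := by
      simp [← hN]; omega
    have hBlen : (B ++ List.replicate (L - M) 0).length = 2 ^ kk := by
      simp [← hM]; omega
    have hfuel : kk ≤ L := by
      rw [hL2]; exact le_of_lt (Nat.lt_two_pow_self)
    have hgz : ∀ x y : Int, (x + y) % pyMod = (x + 1 * y) % pyMod := by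
      intro x y; rw [one_mul]
    have hgm : ∀ x y : Int, (x - y) % pyMod = (x + (-1) * y) % pyMod := by
      intro x y; ring_nf
    have hAz : pvTransform (fun a b => (a + b) % pyMod) (A ++ List.replicate (L - N) 0)
        = pvRecTrans 1 L (A ++ List.replicate (L - N) 0) :=
      pv_trans_eq _ 1 hgz kk _ L hAlen hfuel
    have hBz : pvTransform (fun a b => (a + b) % pyMod) (B ++ List.replicate (L - M) 0)
        = pvRecTrans 1 L (B ++ List.replicate (L - M) 0) :=
      pv_trans_eq _ 1 hgz kk _ L hBlen hfuel
    set A2 := pvTransform (fun a b => (a + b) % pyMod) (A ++ List.replicate (L - N) 0) with hA2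
    set B2 := pvTransform (fun a b => (a + b) % pyMod) (B ++ List.replicate (L - M) 0) with hB2
    have hA2len : A2.length = 2 ^ kk := pv_trans_length _ kk _ hAlen
    have hB2len : B2.length = 2 ^ kk := pv_trans_length _ kk _ hBlen
    -- the transformed tail of A2 (indices ≥ N) is identically zero
    have hpadz : ∀ S, N ≤ S → (A ++ List.replicate (L - N) 0).getD S 0 = 0 := by
      intro S hS
      by_cases hSlen : S < (A ++ List.replicate (L - N) 0).length
      · rw [pv_getD_append_right A _ S (by omega)]
        rw [List.getD_eq_getElem _ _ (by simp at hSlen ⊢; omega)]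
        simp
      · exact List.getD_eq_default _ _ (by omega)
    have hA2z : ∀ S, N ≤ S → A2.getD S 0 = 0 := fun S hS =>
      pv_transform_zero _ (by norm_num) kk N _ hAlen hpadz S hS
    -- both multiply stages are the same range-L map
    have hmul : (List.range N).foldl
        (fun acc i => acc.set i ((acc.getD i 0 * B2.getD i 0) % pyMod)) A2
        = (List.range L).map
            (fun i => if i < N then (A2.getD i 0 * B2.getD i 0) % pyMod else A2.getD i 0) := by
      have := pv_mul_foldl (fun i a => (a * B2.getD i 0) % pyMod) A2 N (by omega)
      rw [this, hA2len, ← hL2]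
    have hzip : List.zipWith (fun x y => (x * y) % pyMod) A2 B2
        = (List.range L).map (fun i => if i < N then (A2.getD i 0 * B2.getD i 0) % pyMod else A2.getD i 0) := by
      rw [pv_zipWith_eq_map_range _ A2 B2 (by omega), hA2len, ← hL2]
      apply List.map_congr_left
      intro S hS
      by_cases hSN : S < N
      · rw [if_pos hSN]
      · rw [if_neg hSN, hA2z S (by omega)]
        norm_num
    rw [hmul, hAz, hBz] at *
    rw [← hzip]
    apply pv_trans_eq _ (-1) hgm kk _ L _ hfuel
    rw [List.length_zipWith, hA2len, hB2len]
    simp
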